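-- pv_equiv track=rewrite | github.com/nermadie/CodeForces_Solutions | CodeforcesRound925Div3/prob03.py | can_equalize_water
-- ===== SOURCE A (Python) =====
-- def can_equalize_water(n, containers):
--   left_sequence = 1
--   right_sequence = 1
--   for i in range (1, len(containers)):
--     if containers[i] == containers[i-1]:
--       left_sequence += 1
--     else:
--       break
--   if left_sequence == n:
--     return 0
--   for i in range (len(containers)-2, -1, -1):
--     if containers[i] == containers[i+1]:
--       right_sequence += 1
--     else:
--       break
--
--   if containers[0] == containers[-1]:
--     return n - left_sequence - right_sequence
--   else:
--     return n - max(left_sequence, right_sequence)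
-- ===== SOURCE B (Python) =====
-- def can_equalize_water(n, containers):
--     # One pass building the full run-length encoding, then only end indexing.
--     groups = []
--     for x in containers:
--         if groups and groups[-1][0] == x:
--             groups[-1][1] += 1
--         else:
--             groups.append([x, 1])
--     left = groups[0][1]
--     if left == n:
--         return 0
--     right = groups[-1][1]
--     if containers[0] == containers[-1]:
--         return n - left - right
--     return n - max(left, right)
-- ===== Notes on version B (the rewrite author's own statement) =====
-- stated objective: alternative
-- what changed: Replaces the two early-breaking end scans with a single pass that builds the full run-length encoding and then reads the first and last group lengths.
-- outside the precondition, e.g. on can_equalize_water(1, []): A returns 0, B raises IndexError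
import Mathlib
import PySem

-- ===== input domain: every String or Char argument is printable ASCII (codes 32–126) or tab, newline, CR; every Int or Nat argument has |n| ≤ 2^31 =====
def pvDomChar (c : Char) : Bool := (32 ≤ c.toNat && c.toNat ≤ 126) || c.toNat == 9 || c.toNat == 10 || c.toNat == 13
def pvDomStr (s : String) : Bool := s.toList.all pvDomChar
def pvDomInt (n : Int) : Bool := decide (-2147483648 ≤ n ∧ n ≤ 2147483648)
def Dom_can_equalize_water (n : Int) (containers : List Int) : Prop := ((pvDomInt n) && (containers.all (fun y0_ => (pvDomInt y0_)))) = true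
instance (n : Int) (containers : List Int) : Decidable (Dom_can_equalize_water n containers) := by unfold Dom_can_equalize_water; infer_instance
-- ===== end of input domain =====

-- B builds the full run-length encoding in one pass and indexes its ends, instead of A's two early-breaking end scans (objective: alternative; return value only, no mutation).

-- ===== PORT A =====
-- A's early-breaking scan: walks the list while elements equal the previous one, incrementing acc, and stops at the first mismatch (the 'break').
def runA (prev : Int) (xs : List Int) (acc : Int) : Int :=
  match xs with
  | [] => acc
  | x :: rest => if x = prev then runA x rest (acc + 1) else acc

def can_equalize_water (n : Int) (containers : List Int) : Int :=
  -- left_sequence: scan from index 1 comparing containers[i] with containers[i-1]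
  let left : Int := match containers with
    | [] => 1
    | c0 :: rest => runA c0 rest 1
  if left = n then 0
  else
    -- right_sequence: the descending index scan comparing containers[i] with containers[i+1]
    -- is the same early-breaking scan over the reversed list
    let right : Int := match containers.reverse with
      | [] => 1
      | r0 :: rr => runA r0 rr 1
    match containers.head?, containers.getLast? with
    | some a, some b => if a = b then n - left - right else n - max left right
    | _, _ => 0  -- unreachable under Pre_: Python raises IndexError on empty containers

-- ===== PORT B =====
-- one step of building the run-length encoding: bump the count of the last group or append a new group
def rleStep (gs : List (Int × Int)) (x : Int) : List (Int × Int) :=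
  match gs.getLast? with
  | some (v, c) => if v = x then gs.dropLast ++ [(v, c + 1)] else gs ++ [(x, 1)]
  | none => [(x, 1)]

-- groups[0][1]: the count of the first group, recursing from the front
def headCountB (gs : List (Int × Int)) : Int :=
  match gs with
  | [] => 0
  | (_, c) :: _ => c

-- groups[-1][1]: the count of the last group, recursing to the end
def lastCountB (gs : List (Int × Int)) : Int :=
  match gs with
  | [] => 0
  | [(_, c)] => c
  | _ :: g2 :: rest => lastCountB (g2 :: rest)

def can_equalize_water_alt (n : Int) (containers : List Int) : Int :=
  let groups := containers.foldl rleStep []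
  if groups = [] then 0  -- here Python's groups[0] raises IndexError (empty input, excluded by Pre_)
  else
    let left := headCountB groups
    if left = n then 0
    else
      let right := lastCountB groups
      -- containers[0] == containers[-1]; as Option equality, exact for nonempty containers
      if containers.head? = containers.getLast? then n - left - right
      else n - max left right

-- ===== PRECONDITION & SPEC =====
-- Pre_ excludes empty containers: there A's left_sequence = 1 is leftover loop initialization, so A
-- accidentally returns 0 when n == 1 and raises IndexError otherwise; B raises IndexError on every
-- empty input, so this defensible corner is excluded rather than mimicked.
def Pre_can_equalize_water (_n : Int) (containers : List Int) : Prop := containers ≠ []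
instance (n : Int) (containers : List Int) : Decidable (Pre_can_equalize_water n containers) := by unfold Pre_can_equalize_water; infer_instance
def pvWitness_can_equalize_water : Int × List Int := (3, [1, 2, 2])

def Spec_can_equalize_water (n : Int) (containers : List Int) (out : Int) : Prop := out = can_equalize_water_alt n containers
instance (n : Int) (containers : List Int) (out : Int) : Decidable (Spec_can_equalize_water n containers out) := by unfold Spec_can_equalize_water; infer_instance

-- ===== CLAIM (what is proved, stated in full; the proofs are below) =====
def Claim_equal_can_equalize_water : Prop := ∀ (n : Int) (containers : List Int), Dom_can_equalize_water n containers → Pre_can_equalize_water n containers → Spec_can_equalize_water n containers (can_equalize_water n containers)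

-- ===== LEMMAS AND PROOFS =====

theorem runA_shift (xs : List Int) : ∀ (v c d : Int), runA v xs (c + d) = runA v xs c + d := by
  induction xs with
  | nil => intro v c d; simp [runA]
  | cons x rest ih =>
    intro v c d
    simp only [runA]
    split
    · have : c + d + 1 = (c + 1) + d := by ring
      rw [this, ih]
    · rfl

theorem rleStep_ne_nil (gs : List (Int × Int)) (x : Int) : rleStep gs x ≠ [] := by
  unfold rleStep
  rcases h : gs.getLast? with _ | ⟨v, c⟩ <;> simp
  split <;> simp

theorem rleStep_append (gs hs : List (Int × Int)) (x : Int) (h : hs ≠ []) :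
    rleStep (gs ++ hs) x = gs ++ rleStep hs x := by
  unfold rleStep
  rw [List.getLast?_append_of_ne_nil gs h]
  rcases hl : hs.getLast? with _ | ⟨v, c⟩
  · exact absurd (List.getLast?_eq_none_iff.mp hl) h
  · simp only
    split
    · rw [List.dropLast_append_of_ne_nil h, List.append_assoc]
    · rw [List.append_assoc]

theorem foldl_rleStep_append (l : List Int) : ∀ (gs hs : List (Int × Int)), hs ≠ [] →
    List.foldl rleStep (gs ++ hs) l = gs ++ List.foldl rleStep hs l := by
  induction l with
  | nil => intro gs hs _; simp
  | cons x rest ih =>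
    intro gs hs h
    simp only [List.foldl_cons]
    rw [rleStep_append gs hs x h, ih gs _ (rleStep_ne_nil hs x)]

theorem head_foldl_rleStep (xs : List Int) : ∀ (v : Int) (c : Int),
    (List.foldl rleStep [(v, c)] xs).head? = some (v, runA v xs c) := by
  induction xs with
  | nil => intro v c; simp [runA]
  | cons x rest ih =>
    intro v c
    simp only [List.foldl_cons, runA]
    have hstep : rleStep [(v, c)] x =
        if v = x then [(v, c + 1)] else [(v, c), (x, 1)] := by
      simp [rleStep]
    by_cases hvx : v = x
    · rw [hstep, if_pos hvx, if_pos hvx.symm, hvx, ih]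
    · rw [hstep, if_neg hvx, if_neg (fun hxv => hvx hxv.symm)]
      have : [(v, c), (x, (1 : Int))] = [(v, c)] ++ [(x, 1)] := rfl
      rw [this, foldl_rleStep_append rest [(v, c)] [(x, 1)] (by simp)]
      simp

theorem last_foldl_rleStep (l : List Int) (h : l ≠ []) :
    (List.foldl rleStep [] l).getLast? =
      (match l.reverse with
       | [] => none
       | r0 :: rr => some (r0, runA r0 rr 1)) := by
  induction l using List.reverseRecOn with
  | nil => exact absurd rfl h
  | append_singleton xs y ih =>
    rw [List.foldl_append]
    simp only [List.foldl_cons, List.foldl_nil, List.reverse_append, List.reverse_cons,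
      List.reverse_nil, List.nil_append, List.cons_append]
    cases xs with
    | nil => simp [rleStep, runA]
    | cons x0 xr =>
      have hne : (x0 :: xr) ≠ ([] : List Int) := by simp
      have ihh := ih hne
      rcases hrev : (x0 :: xr).reverse with _ | ⟨r0, rr⟩
      · exact absurd (List.reverse_eq_nil_iff.mp hrev) hne
      · rw [hrev] at ihh
        simp only at ihh
        generalize hG : List.foldl rleStep [] (x0 :: xr) = G at ihh ⊢
        unfold rleStep
        rw [ihh]
        by_cases hy : r0 = y
        · subst hy
          have h2 : runA r0 (r0 :: rr) 1 = runA r0 rr 1 + 1 := by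
            simp only [runA]
            simpa using runA_shift rr r0 1 1
          simp [h2]
        · simp [hy, runA]

theorem headCountB_eq (gs : List (Int × Int)) (v c : Int) (h : gs.head? = some (v, c)) :
    headCountB gs = c := by
  cases gs with
  | nil => simp at h
  | cons g gr => simp at h; simp [headCountB, h]

theorem lastCountB_eq (gs : List (Int × Int)) : ∀ (v c : Int), gs.getLast? = some (v, c) →
    lastCountB gs = c := by
  induction gs with
  | nil => intro v c h; simp at h
  | cons g gr ih =>
    intro v c h
    cases gr with
    | nil => simp at h; simp [lastCountB, h]
    | cons g2 gr2 =>
      rw [List.getLast?_cons_cons] at h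
      simpa [lastCountB] using ih v c h

-- ===== VERDICT (by name: the statement is the Claim_ definition above) =====
theorem can_equalize_water_spec : Claim_equal_can_equalize_water := by
  intro n containers _ hpre
  unfold Spec_can_equalize_water
  cases containers with
  | nil => exact absurd rfl hpre
  | cons c0 rest =>
    have hfold : List.foldl rleStep [] (c0 :: rest) = List.foldl rleStep [(c0, 1)] rest := by
      simp [rleStep]
    have hhead := head_foldl_rleStep rest c0 1
    rcases hrev : (c0 :: rest).reverse with _ | ⟨r0, rr⟩
    · exact absurd (List.reverse_eq_nil_iff.mp hrev) (by simp)
    · have hlast := last_foldl_rleStep (c0 :: rest) (by simp)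
      rw [hrev] at hlast
      simp only at hlast
      rw [hfold] at hlast
      have hgl : (c0 :: rest).getLast? = some r0 := by
        rw [← List.head?_reverse, hrev]; rfl
      have hne : List.foldl rleStep [(c0, 1)] rest ≠ [] := by
        intro hnil; rw [hnil] at hhead; simp at hhead
      unfold can_equalize_water can_equalize_water_alt
      simp only [hfold, hrev, hgl, List.head?_cons, if_neg hne,
        headCountB_eq _ _ _ hhead, lastCountB_eq _ _ _ hlast, Option.some.injEq]
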